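-- pv_equiv track=rewrite | github.com/kalyugwasi/Practice | cp/python/problems/1200/2200D.py | min_rotation_start
-- ===== SOURCE A (Python) =====
-- def min_rotation_start(s):
--     s = s + s
--     n = len(s)
--     f = [-1] * n
--     k = 0
--     for j in range(1, n):
--         sj = s[j]
--         i = f[j - k - 1]
--         while i != -1 and sj != s[k + i + 1]:
--             if sj < s[k + i + 1]:
--                 k = j - i - 1
--             i = f[i]
--         if sj != s[k + i + 1]:
--             if sj < s[k]:
--                 k = j
--             f[j - k] = -1
--         else:
--             f[j - k] = i + 1
--     return k
-- ===== SOURCE B (Python) =====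
-- def _mb(t):
--     # length of the longest proper border (prefix that is also a suffix) of t
--     for L in range(len(t) - 1, 0, -1):
--         if t[:L] == t[len(t) - L:]:
--             return L
--     return 0
--
--
-- def min_rotation_start(s):
--     # Table-free variant: instead of Booth's failure-function array, recompute
--     # the border lengths of the current candidate's matched prefix directly.
--     d = s + s
--     n = len(d)
--     k = 0
--     for j in range(1, n):
--         c = d[j]
--         t = d[k:j]
--         b = _mb(t)
--         while b > 0 and c != t[b]:
--             if c < t[b]:
--                 k = j - b
--             b = _mb(t[:b])
--         if c != t[b]:
--             if c < t[0]:
--                 k = j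
--     return k
-- ===== Notes on version B (the rewrite author's own statement) =====
-- stated objective: alternative
-- what changed: Booth's incrementally maintained failure-function array is removed: B carries only the candidate index k across iterations and recomputes the needed longest-proper-border lengths of the current candidate's matched prefix directly by substring comparison.
import Mathlib
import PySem

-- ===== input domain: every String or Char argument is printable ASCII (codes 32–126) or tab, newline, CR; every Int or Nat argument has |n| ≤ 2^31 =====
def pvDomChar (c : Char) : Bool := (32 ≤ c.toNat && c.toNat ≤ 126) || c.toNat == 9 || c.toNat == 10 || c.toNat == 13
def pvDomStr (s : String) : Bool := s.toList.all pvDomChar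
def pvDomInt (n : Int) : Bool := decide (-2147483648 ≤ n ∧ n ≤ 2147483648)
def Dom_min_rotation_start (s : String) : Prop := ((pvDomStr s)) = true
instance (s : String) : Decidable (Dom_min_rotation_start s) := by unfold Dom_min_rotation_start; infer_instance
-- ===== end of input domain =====

-- B replaces Booth's failure-function array by direct recomputation of border lengths
-- (objective: alternative — same per-step candidate elimination, table-free state).

-- ===== PORT A =====
-- Python indexing s[x] / f[x]: every index A actually uses is in range, so the
-- IndexError branch of pyGet? is unreachable; `.getD` supplies an arbitrary default there.
def pvGetC (l : List Char) (x : Int) : Char := (PySem.List.pyGet? l x).getD ' '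
def pvGetI (f : List Int) (x : Int) : Int := (PySem.List.pyGet? f x).getD 0

-- the inner `while i != -1 and sj != s[k+i+1]` loop; fuel bounds the number of
-- iterations (i strictly decreases in every real run, so fuel i0+2 never runs out)
def boothWhile (l : List Char) (f : List Int) (sj : Char) (j : Int) : Nat → Int → Int → Int × Int
  | 0, i, k => (i, k)
  | fuel+1, i, k =>
    if i ≠ -1 ∧ sj ≠ pvGetC l (k + i + 1) then
      boothWhile l f sj j fuel (pvGetI f i) (if sj < pvGetC l (k + i + 1) then j - i - 1 else k)
    else (i, k)

-- one iteration of A's `for j in range(1, n)` body (state: k and the table f)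
def boothStep (l : List Char) (j : Int) (kf : Int × List Int) : Int × List Int :=
  let k := kf.1
  let f := kf.2
  let sj := pvGetC l j
  let i0 := pvGetI f (j - k - 1)
  let r := boothWhile l f sj j (i0 + 2).toNat i0 k
  let i := r.1
  let k1 := r.2
  if sj ≠ pvGetC l (k1 + i + 1) then
    let k2 := if sj < pvGetC l k1 then j else k1
    (k2, f.set (j - k2).toNat (-1))
  else (k1, f.set (j - k1).toNat (i + 1))

def min_rotation_start (s : String) : Int :=
  let l := s.toList ++ s.toList
  ((PySem.List.pyRange 1 (l.length : Int) 1).foldl (fun kf j => boothStep l j kf)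
    (0, List.replicate l.length (-1))).1

-- ===== PORT B =====
-- `_mb(t)`: the downward scan `for L in range(len(t)-1, 0, -1)`
def pvMbAux (t : List Char) : Nat → Int
  | 0 => 0
  | L+1 => if t.take (L+1) = t.drop (t.length - (L+1)) then ((L+1 : Nat) : Int) else pvMbAux t L

def pvMb (t : List Char) : Int := pvMbAux t (t.length - 1)

-- B's `while b > 0 and c != t[b]` loop (fuel b0+1 never runs out: b strictly decreases)
def altWhile (t : List Char) (c : Char) (j : Int) : Nat → Int → Int → Int × Int
  | 0, b, k => (b, k)
  | fuel+1, b, k =>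
    if b > 0 ∧ c ≠ pvGetC t b then
      altWhile t c j fuel (pvMb (t.take b.toNat)) (if c < pvGetC t b then j - b else k)
    else (b, k)

-- one iteration of B's loop body (state: only k)
def altStep (l : List Char) (j k : Int) : Int :=
  let c := pvGetC l j
  let t := PySem.List.slice l (some k) (some j)
  let b0 := pvMb t
  let r := altWhile t c j (b0 + 1).toNat b0 k
  if c ≠ pvGetC t r.1 then (if c < pvGetC t 0 then j else r.2) else r.2

def min_rotation_start_alt (s : String) : Int :=
  let l := s.toList ++ s.toList
  (PySem.List.pyRange 1 (l.length : Int) 1).foldl (fun k j => altStep l j k) 0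

-- ===== PRECONDITION & SPEC =====
def Spec_min_rotation_start (s : String) (out : Int) : Prop := out = min_rotation_start_alt s
instance (s : String) (out : Int) : Decidable (Spec_min_rotation_start s out) := by unfold Spec_min_rotation_start; infer_instance

-- ===== CLAIM (what is proved, stated in full; the proofs are below) =====
def Claim_equal_min_rotation_start : Prop := ∀ (s : String), Dom_min_rotation_start s → Spec_min_rotation_start s (min_rotation_start s)

-- ===== LEMMAS AND PROOFS =====

-- `isB t b`: a prefix of t of length b is also a suffix of t (a border of t)
def isB (t : List Char) (b : Nat) : Prop :=
  b ≤ t.length ∧ ∀ p, p < b → t.getD p ' ' = t.getD (t.length - b + p) ' '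

lemma isB_zero (t : List Char) : isB t 0 :=
  ⟨Nat.zero_le _, fun p hp => absurd hp (Nat.not_lt_zero p)⟩

lemma isB_len (t : List Char) : isB t t.length :=
  ⟨le_refl _, fun p _ => by simp⟩

lemma getD_take (t : List Char) (m p : Nat) (h : p < m) (hm : m ≤ t.length) :
    (t.take m).getD p ' ' = t.getD p ' ' := by
  have h1 : p < (t.take m).length := by simp; omega
  have h2 : p < t.length := by omega
  rw [List.getD_eq_getElem _ _ h1, List.getD_eq_getElem _ _ h2]
  simp [List.getElem_take]

lemma take_eq_drop_iff_isB (t : List Char) (L : Nat) (hL : L ≤ t.length) :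
    (t.take L = t.drop (t.length - L)) ↔ isB t L := by
  constructor
  · intro h
    refine ⟨hL, fun p hp => ?_⟩
    have hp1 : p < t.length := by omega
    have hp2 : t.length - L + p < t.length := by omega
    rw [List.getD_eq_getElem _ _ hp1, List.getD_eq_getElem _ _ hp2]
    have h1 : (t.take L)[p]'(by simp; omega) = (t.drop (t.length - L))[p]'(by simp; omega) := by
      simp [h]
    simpa using h1
  · rintro ⟨-, h⟩
    apply List.ext_getElem
    · simp; omega
    · intro i h1 h2
      have hi : i < L := by simp at h1; omega
      have := h i hi
      rw [List.getD_eq_getElem _ _ (by omega : i < t.length),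
          List.getD_eq_getElem _ _ (by omega : t.length - L + i < t.length)] at this
      simpa using this

lemma pvMbAux_spec (t : List Char) (L : Nat) (hL : L < t.length) :
    ∃ M : Nat, pvMbAux t L = (M : Int) ∧ M ≤ L ∧ isB t M ∧
      ∀ b, isB t b → b ≤ L → b ≤ M := by
  induction L with
  | zero => exact ⟨0, rfl, le_refl _, isB_zero t, fun b hb hb0 => hb0⟩
  | succ L ih =>
    rw [pvMbAux]
    by_cases h : t.take (L+1) = t.drop (t.length - (L+1))
    · refine ⟨L+1, by simp [h], le_refl _, ?_, fun b _ hb => hb⟩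
      exact (take_eq_drop_iff_isB t (L+1) (by omega)).mp h
    · obtain ⟨M, hM1, hM2, hM3, hM4⟩ := ih (by omega)
      refine ⟨M, by simp [h, hM1], by omega, hM3, fun b hb hbL => ?_⟩
      rcases Nat.lt_succ_iff_lt_or_eq.mp (Nat.lt_succ_of_le hbL) with h' | h'
      · exact hM4 b hb (by omega)
      · exfalso; apply h
        rw [take_eq_drop_iff_isB t (L+1) (by omega)]
        exact h' ▸ hb

lemma pvMb_spec (t : List Char) (ht : t ≠ []) :
    ∃ M : Nat, pvMb t = (M : Int) ∧ M < t.length ∧ isB t M ∧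
      ∀ b, isB t b → b < t.length → b ≤ M := by
  have hl : 0 < t.length := List.length_pos_iff.mpr ht
  obtain ⟨M, h1, h2, h3, h4⟩ := pvMbAux_spec t (t.length - 1) (by omega)
  exact ⟨M, h1, by omega, h3, fun b hb hbl => h4 b hb (by omega)⟩

lemma isB_trans (t : List Char) (b a : Nat) (hb : isB t b) (ha : isB (t.take b) a) : isB t a := by
  obtain ⟨hbl, hbp⟩ := hb
  obtain ⟨hal, hap⟩ := ha
  have hlen : (t.take b).length = b := by simp; omega
  rw [hlen] at hal hap
  refine ⟨by omega, fun p hp => ?_⟩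
  have e1 : t.getD p ' ' = t.getD (b - a + p) ' ' := by
    have := hap p hp
    rwa [getD_take _ _ _ (by omega) hbl, getD_take _ _ _ (by omega) hbl] at this
  have e2 : t.getD (b - a + p) ' ' = t.getD (t.length - a + p) ' ' := by
    have := hbp (b - a + p) (by omega)
    have harith : t.length - b + (b - a + p) = t.length - a + p := by omega
    rw [harith] at this
    exact this
  rw [e1, e2]

lemma isB_restrict (t : List Char) (b a : Nat) (hb : isB t b) (ha : isB t a) (hab : a ≤ b) :
    isB (t.take b) a := by
  obtain ⟨hbl, hbp⟩ := hb
  obtain ⟨hal, hap⟩ := ha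
  have hlen : (t.take b).length = b := by simp; omega
  rw [isB, hlen]
  refine ⟨hab, fun p hp => ?_⟩
  rw [getD_take _ _ _ (by omega) hbl, getD_take _ _ _ (by omega) hbl]
  have e1 := hap p hp
  have e2 := hbp (b - a + p) (by omega)
  have harith : t.length - b + (b - a + p) = t.length - a + p := by omega
  rw [harith] at e2
  rw [e1, ← e2]

lemma isB_snoc (u : List Char) (c : Char) (m : Nat) (hm : m < u.length) :
    isB (u ++ [c]) (m + 1) ↔ (isB u m ∧ u.getD m ' ' = c) := by
  have hlen : (u ++ [c]).length = u.length + 1 := by simp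
  have hgetu : ∀ q, q < u.length → (u ++ [c]).getD q ' ' = u.getD q ' ' := by
    intro q hq
    rw [List.getD_eq_getElem _ _ (by simp; omega), List.getD_eq_getElem _ _ hq]
    simp [List.getElem_append_left hq]
  have hgetc : (u ++ [c]).getD u.length ' ' = c := by
    rw [List.getD_eq_getElem _ _ (by simp)]
    simp
  constructor
  · rintro ⟨h1, h2⟩
    constructor
    · refine ⟨by omega, fun p hp => ?_⟩
      have := h2 p (by omega)
      rw [hlen] at this
      have harith : u.length + 1 - (m + 1) + p = u.length - m + p := by omega
      rw [harith] at this
      rwa [hgetu p (by omega), hgetu (u.length - m + p) (by omega)] at this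
    · have := h2 m (by omega)
      rw [hlen] at this
      have harith : u.length + 1 - (m + 1) + m = u.length := by omega
      rw [harith] at this
      rwa [hgetu m (by omega), hgetc] at this
  · rintro ⟨⟨h1l, h1p⟩, h2⟩
    refine ⟨by omega, fun p hp => ?_⟩
    rw [hlen]
    have harith : u.length + 1 - (m + 1) + p = u.length - m + p := by omega
    rw [harith]
    rcases Nat.lt_succ_iff_lt_or_eq.mp hp with h' | h'
    · rw [hgetu p (by omega), hgetu (u.length - m + p) (by omega)]
      exact h1p p h'
    · rw [h']
      have harith2 : u.length - m + m = u.length := by omega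
      rw [harith2, hgetu m (by omega), hgetc, h2]

lemma pvMb_snoc_eq (u : List Char) (c : Char) (bm : Nat)
    (h1 : isB u bm) (h2 : bm < u.length) (h3 : u.getD bm ' ' = c)
    (h4 : ∀ m, isB u m → m < u.length → u.getD m ' ' = c → m ≤ bm) :
    pvMb (u ++ [c]) = (bm : Int) + 1 := by
  obtain ⟨M, e1, e2, e3, e4⟩ := pvMb_spec (u ++ [c]) (by simp)
  have hlen : (u ++ [c]).length = u.length + 1 := by simp
  rw [hlen] at e2 e4
  have hb1 : bm + 1 ≤ M := e4 (bm + 1) ((isB_snoc u c bm h2).mpr ⟨h1, h3⟩) (by omega)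
  have hM : M ≤ bm + 1 := by
    obtain ⟨m, rfl⟩ : ∃ m, M = m + 1 := ⟨M - 1, by omega⟩
    obtain ⟨g1, g2⟩ := (isB_snoc u c m (by omega)).mp e3
    have := h4 m g1 (by omega) g2
    omega
  have : M = bm + 1 := by omega
  rw [e1, this]; push_cast; ring

lemma pvMb_snoc_zero (u : List Char) (c : Char)
    (h4 : ∀ m, isB u m → m < u.length → u.getD m ' ' ≠ c) :
    pvMb (u ++ [c]) = 0 := by
  obtain ⟨M, e1, e2, e3, e4⟩ := pvMb_spec (u ++ [c]) (by simp)
  have hlen : (u ++ [c]).length = u.length + 1 := by simp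
  rw [hlen] at e2
  have hM : M = 0 := by
    by_contra h
    obtain ⟨m, rfl⟩ : ∃ m, M = m + 1 := ⟨M - 1, by omega⟩
    obtain ⟨g1, g2⟩ := (isB_snoc u c m (by omega)).mp e3
    exact h4 m g1 (by omega) g2
  rw [e1, hM]; rfl

-- `Useg l k m` = l[k : k+m], the candidate's matched prefix
def Useg (l : List Char) (k m : Nat) : List Char := (l.drop k).take m

lemma length_Useg (l : List Char) (k m : Nat) (h : k + m ≤ l.length) :
    (Useg l k m).length = m := by simp [Useg]; omega

lemma getD_Useg (l : List Char) (k m p : Nat) (h : p < m) (h2 : k + m ≤ l.length) :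
    (Useg l k m).getD p ' ' = l.getD (k + p) ' ' := by
  rw [List.getD_eq_getElem _ _ (by rw [length_Useg l k m h2]; omega),
      List.getD_eq_getElem _ _ (by omega : k + p < l.length)]
  simp [Useg]

lemma take_Useg (l : List Char) (k m q : Nat) : (Useg l k m).take q = Useg l k (min q m) := by
  simp [Useg, List.take_take]

lemma Useg_succ (l : List Char) (k m : Nat) (h : k + m < l.length) :
    Useg l k (m + 1) = Useg l k m ++ [l.getD (k + m) ' '] := by
  simp only [Useg]
  rw [List.take_add_one]
  congr 1
  rw [List.getElem?_drop, List.getElem?_eq_getElem (by omega),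
      List.getD_eq_getElem _ _ (by omega)]
  rfl

lemma pvGetC_nat (l : List Char) (p : Nat) (h : p < l.length) :
    pvGetC l (p : Int) = l.getD p ' ' := by
  rw [pvGetC, PySem.List.pyGet?_natCast, List.getElem?_eq_getElem h,
      List.getD_eq_getElem _ _ h]
  rfl

lemma pvGetI_set_ne (f : List Int) (q : Nat) (v : Int) (p : Nat) (hne : p ≠ q) :
    pvGetI (f.set q v) (p : Int) = pvGetI f (p : Int) := by
  rw [pvGetI, pvGetI, PySem.List.pyGet?_natCast, PySem.List.pyGet?_natCast,
      List.getElem?_set_ne (by omega)]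

lemma pvGetI_set_self (f : List Int) (q : Nat) (v : Int) (h : q < f.length) :
    pvGetI (f.set q v) (q : Int) = v := by
  rw [pvGetI, PySem.List.pyGet?_natCast, List.getElem?_set_self', List.getElem?_eq_getElem h]
  rfl

-- a matched border occurrence: characters of the shifted candidate agree with t
lemma charloc (l : List Char) (k0 T L p : Nat) (hT : k0 + T ≤ l.length)
    (hB : isB (Useg l k0 T) L) (hL : L ≤ T) (hp : p < L) :
    l.getD (k0 + (T - L) + p) ' ' = (Useg l k0 T).getD p ' ' := by
  obtain ⟨-, hpt⟩ := hB
  have e := hpt p hp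
  rw [length_Useg l k0 T hT] at e
  rw [e, getD_Useg l k0 T _ (by omega) hT]
  congr 1
  omega

-- the coupled inner-loop simulation
lemma whileSim (l : List Char) (f : List Int) (c : Char) (k0 T : Nat)
    (hTl : k0 + T < l.length)
    (Hf : ∀ m : Nat, m < T → pvGetI f (m : Int) = pvMb ((Useg l k0 T).take (m+1)) - 1) :
    ∀ b L : Nat, isB (Useg l k0 T) b → isB (Useg l k0 T) L → b < L → L ≤ T →
    (∀ b', isB (Useg l k0 T) b' → b < b' → b' < L → (Useg l k0 T).getD b' ' ' ≠ c) →
    ∀ fa fb : Nat, b + 1 ≤ fa → b + 1 ≤ fb →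
    ∃ b1 L1 : Nat,
      altWhile (Useg l k0 T) c ((k0 : Int) + T) fb (b : Int) ((k0 : Int) + T - L) = ((b1 : Int), (k0 : Int) + T - L1) ∧
      boothWhile l f c ((k0 : Int) + T) fa ((b : Int) - 1) ((k0 : Int) + T - L) = ((b1 : Int) - 1, (k0 : Int) + T - L1) ∧
      isB (Useg l k0 T) b1 ∧ isB (Useg l k0 T) L1 ∧ b1 < L1 ∧ L1 ≤ L ∧
      (b1 = 0 ∨ (Useg l k0 T).getD b1 ' ' = c) ∧
      (∀ b', isB (Useg l k0 T) b' → b1 < b' → b' < L1 → (Useg l k0 T).getD b' ' ' ≠ c) := by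
  intro b
  induction b using Nat.strong_induction_on with
  | _ b ih =>
  intro L hb hL hbL hLT hR fa fb hfa hfb
  set t := Useg l k0 T with htdef
  have lent : t.length = T := length_Useg l k0 T (by omega)
  obtain ⟨fa', rfl⟩ : ∃ x, fa = x + 1 := ⟨fa - 1, by omega⟩
  obtain ⟨fb', rfl⟩ : ∃ x, fb = x + 1 := ⟨fb - 1, by omega⟩
  have hidx : (k0 : Int) + T - L + ((b : Int) - 1) + 1 = ((k0 + (T - L) + b : Nat) : Int) := by
    push_cast; omega
  have hcharA : pvGetC l ((k0 : Int) + T - L + ((b : Int) - 1) + 1) = t.getD b ' ' := by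
    rw [hidx, pvGetC_nat l _ (by omega)]
    exact charloc l k0 T L b (by omega) hL hLT hbL
  have hcharB : pvGetC t (b : Int) = t.getD b ' ' := pvGetC_nat t b (by omega)
  rcases Nat.eq_zero_or_pos b with hb0 | hbpos
  · subst hb0
    refine ⟨0, L, ?_, ?_, hb, hL, hbL, le_refl _, Or.inl rfl, hR⟩
    · rw [altWhile, if_neg (by simp)]
    · rw [boothWhile, if_neg (fun h => h.1 (by norm_num))]
  · by_cases hc : t.getD b ' ' = c
    · refine ⟨b, L, ?_, ?_, hb, hL, hbL, le_refl _, Or.inr hc, hR⟩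
      · rw [altWhile, if_neg (by rw [hcharB, hc]; simp)]
      · rw [boothWhile, if_neg (by rw [hcharA, hc]; simp)]
    · -- mismatch: advance along the border chain
      have hlentake : (t.take b).length = b := by rw [List.length_take, lent]; omega
      have hmb := pvMb_spec (t.take b) (by
        intro h
        rw [h] at hlentake
        simp at hlentake
        omega)
      obtain ⟨M, eM, hM2, hM3, hM4⟩ := hmb
      rw [List.length_take, lent] at hM2 hM4
      have hM2' : M < b := by omega
      have hfb : pvGetI f ((b : Int) - 1) = (M : Int) - 1 := by
        have hcast : (b : Int) - 1 = ((b - 1 : Nat) : Int) := by omega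
        rw [hcast, Hf (b-1) (by omega)]
        have : b - 1 + 1 = b := by omega
        rw [this, eM]
      have hMB : isB t M := isB_trans t b M hb hM3
      -- the branch condition is the same character comparison in both loops
      set L' : Nat := if c < t.getD b ' ' then b else L with hL'def
      have hL'T : L' ≤ T := by rw [hL'def]; split <;> omega
      have hL'B : isB t L' := by rw [hL'def]; split; exact hb; exact hL
      have hML' : M < L' := by rw [hL'def]; split <;> omega
      have hR' : ∀ b', isB t b' → M < b' → b' < L' → t.getD b' ' ' ≠ c := by
        intro b' hb' h1 h2
        by_cases hlt : b' < b
        · intro hcc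
          have : isB (t.take b) b' := isB_restrict t b b' hb hb' (by omega)
          have := hM4 b' this (by omega)
          omega
        · rcases Nat.eq_or_lt_of_le (Nat.le_of_not_lt hlt) with h' | h'
          · rw [← h']; exact hc
          · have hL'L : L' = L := by
              rw [hL'def]; split
              · exfalso; rw [hL'def] at h2; split at h2 <;> omega
              · rfl
            exact hR b' hb' (by omega) (by omega)
      obtain ⟨b1, L1, e1, e2, p1, p2, p3, p4, p5, p6⟩ :=
        ih M hM2' L' hMB hL'B hML' hL'T hR' fa' fb' (by omega) (by omega)
      refine ⟨b1, L1, ?_, ?_, p1, p2, p3, by rw [hL'def] at p4; split at p4 <;> omega, p5, p6⟩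
      · rw [altWhile, if_pos ⟨by exact_mod_cast hbpos, by rw [hcharB]; exact fun h => hc h.symm⟩]
        have harg1 : pvMb (t.take ((b : Int)).toNat) = (M : Int) := by
          rw [Int.toNat_natCast, eM]
        have harg2 : (if c < pvGetC t (b : Int) then (k0 : Int) + T - (b : Int) else (k0 : Int) + T - L) = (k0 : Int) + T - L' := by
          rw [hcharB, hL'def]
          split <;> [skip; rfl]
          ring
        rw [harg1, harg2]
        exact e1
      · rw [boothWhile, if_pos ⟨by omega, by rw [hcharA]; exact fun h => hc h.symm⟩]
        have harg1 : pvGetI f ((b:Int) - 1) = (M : Int) - 1 := hfb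
        have harg2 : (if c < pvGetC l ((k0 : Int) + T - L + ((b : Int) - 1) + 1) then (k0 : Int) + T - ((b : Int) - 1) - 1 else (k0 : Int) + T - L) = (k0 : Int) + T - L' := by
          rw [hcharA, hL'def]
          split <;> [skip; rfl]
          ring
        rw [harg1, harg2]
        exact e2

-- a shifted candidate's window is a prefix of the old matched prefix
lemma Useg_shift (l : List Char) (k T L : Nat) (hTl : k + T ≤ l.length)
    (hB : isB (Useg l k T) L) (hLT : L ≤ T) :
    Useg l (k + (T - L)) L = (Useg l k T).take L := by
  apply List.ext_getElem
  · rw [length_Useg l _ L (by omega), List.length_take, length_Useg l k T hTl]; omega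
  · intro i h1 h2
    have hiL : i < L := by rw [length_Useg l _ L (by omega)] at h1; exact h1
    rw [← List.getD_eq_getElem _ ' ' h1, ← List.getD_eq_getElem _ ' ' h2]
    rw [getD_Useg l _ L i hiL (by omega),
        getD_take _ L i hiL (by rw [length_Useg l k T hTl]; exact hLT)]
    exact charloc l k T L i hTl hB hLT hiL

-- the outer-loop invariant tying A's failure table to recomputed border lengths
def OutInv (l : List Char) (j k : Nat) (f : List Int) : Prop :=
  k < j ∧ f.length = l.length ∧
  ∀ m : Nat, m < j - k → pvGetI f (m : Int) = pvMb (Useg l k (m+1)) - 1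

lemma stepSim (l : List Char) (j k : Nat) (f : List Int)
    (hj : j < l.length) (hinv : OutInv l j k f) :
    ∃ (k2 : Nat) (f2 : List Int),
      boothStep l (j : Int) ((k : Int), f) = ((k2 : Int), f2) ∧
      altStep l (j : Int) (k : Int) = (k2 : Int) ∧
      OutInv l (j+1) k2 f2 := by
  obtain ⟨hkj, hflen, hent⟩ := hinv
  set T := j - k with hTdef
  have hjkT : j = k + T := by omega
  set t := Useg l k T with htdef
  have lent : t.length = T := length_Useg l k T (by omega)
  set c := pvGetC l (j : Int) with hcdef
  have hcval : c = l.getD j ' ' := pvGetC_nat l j hj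
  have tne : t ≠ [] := by intro h; rw [h] at lent; simp at lent; omega
  obtain ⟨b0, eb0, hb0T, hb0B, hb0max⟩ := pvMb_spec t tne
  rw [lent] at hb0T hb0max
  have Hf : ∀ m : Nat, m < T → pvGetI f (m : Int) = pvMb (t.take (m+1)) - 1 := by
    intro m hm
    rw [hent m (by omega)]
    congr 2
    rw [htdef, take_Useg]
    congr 1
    omega
  have hR0 : ∀ b', isB t b' → b0 < b' → b' < T → t.getD b' ' ' ≠ c := by
    intro b' hb' h1 h2 _
    have := hb0max b' hb' (by omega)
    omega
  obtain ⟨b1, L1, e1, e2, p1, p2, p3, p4, p5, p6⟩ :=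
    whileSim l f c k T (by omega) Hf b0 T hb0B (by rw [← htdef, ← lent]; exact isB_len t)
      (by omega) (le_refl T) hR0 (b0+1) (b0+1) (le_refl _) (le_refl _)
  have e1' : altWhile t c ((k : Int) + T) (b0+1) (b0 : Int) (k : Int) = ((b1 : Int), (k : Int) + T - L1) := by
    have h := e1
    rwa [show ((k : Int) + T - T) = (k : Int) from by ring] at h
  have e2' : boothWhile l f c ((k : Int) + T) (b0+1) ((b0 : Int) - 1) (k : Int) = ((b1 : Int) - 1, (k : Int) + T - L1) := by
    have h := e2
    rwa [show ((k : Int) + T - T) = (k : Int) from by ring] at h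
  have hjcast : (j : Int) = (k : Int) + T := by omega
  -- the exit character comparison is the same in both programs
  have hL1T : L1 ≤ T := p4
  have hidx2 : ((k : Int) + T - L1) + ((b1 : Int) - 1) + 1 = ((k + (T - L1) + b1 : Nat) : Int) := by
    push_cast; omega
  have hch1 : pvGetC l (((k : Int) + T - L1) + ((b1 : Int) - 1) + 1) = t.getD b1 ' ' := by
    rw [hidx2, pvGetC_nat l _ (by omega)]
    exact charloc l k T L1 b1 (by omega) p2 (by omega) p3
  have hch1B : pvGetC t (b1 : Int) = t.getD b1 ' ' := pvGetC_nat t b1 (by omega)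
  have hch0 : pvGetC l ((k : Int) + T - L1) = t.getD 0 ' ' := by
    have h : ((k : Int) + T - L1) = ((k + (T - L1) + 0 : Nat) : Int) := by omega
    rw [h, pvGetC_nat l _ (by omega)]
    exact charloc l k T L1 0 (by omega) p2 (by omega) (by omega)
  have hch0B : pvGetC t (0 : Int) = t.getD 0 ' ' := by
    have h : (0 : Int) = ((0 : Nat) : Int) := rfl
    rw [h, pvGetC_nat t 0 (by omega)]
  -- A's initial failure-table read is B's recomputed border length
  have hi0 : pvGetI f ((j : Int) - k - 1) = (b0 : Int) - 1 := by
    have h : (j : Int) - k - 1 = ((T - 1 : Nat) : Int) := by omega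
    rw [h, Hf (T-1) (by omega)]
    have h2 : T - 1 + 1 = T := by omega
    rw [h2, ← lent]
    simp [eb0]
  have hslice : PySem.List.slice l (some (k : Int)) (some (j : Int)) = t := by
    rw [PySem.List.slice_natCast, htdef, Useg, hTdef]
  -- the common window u = l[k1 : j] and its extension by c
  set k2n : Nat := k + (T - L1) with hk2def
  have hk1cast : ((k : Int) + T - L1) = (k2n : Nat) := by omega
  have hu : Useg l k2n L1 = t.take L1 := Useg_shift l k T L1 (by omega) p2 hL1T
  have hlenu : (t.take L1).length = L1 := by rw [List.length_take, lent]; omega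
  have husucc : Useg l k2n (L1 + 1) = t.take L1 ++ [c] := by
    have hix : k2n + L1 = j := by omega
    rw [Useg_succ l k2n L1 (by omega), hu, hix, hcval]
  have hintro : ∀ m : Nat, m < L1 → Useg l k2n (m+1) = t.take (m+1) := by
    intro m hm
    have h1 : (Useg l k2n L1).take (m+1) = Useg l k2n (min (m+1) L1) := take_Useg l k2n L1 (m+1)
    rw [hu] at h1
    rw [List.take_take] at h1
    have h2 : min (m+1) L1 = m + 1 := by omega
    rw [h2] at h1
    exact h1.symm
  have hfL1 : L1 < f.length := by rw [hflen]; omega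
  -- common invariant-restoration for the two no-new-candidate exits
  have hkeep : ∀ v : Int, (pvMb (Useg l k2n (L1+1)) - 1 = v) →
      OutInv l (j+1) k2n (f.set L1 v) := by
    intro v hv
    refine ⟨by omega, by rw [List.length_set]; exact hflen, ?_⟩
    intro m hm
    have hmL1 : m ≤ L1 := by omega
    rcases Nat.lt_or_ge m L1 with hlt | hge
    · rw [pvGetI_set_ne f L1 v m (by omega), hent m (by omega), hintro m hlt]
      congr 2
      rw [htdef, take_Useg]
      congr 1
      omega
    · have hmeq : m = L1 := by omega
      rw [hmeq, pvGetI_set_self f L1 v hfL1, ← hv]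
  by_cases heq : c = t.getD b1 ' '
  · -- matched exit: A extends the table, candidate unchanged
    refine ⟨k2n, f.set L1 ((b1 : Int) - 1 + 1), ?_, ?_, ?_⟩
    · simp only [boothStep]
      rw [← hcdef, hi0, show ((b0 : Int) - 1 + 2).toNat = b0 + 1 from by omega, hjcast, e2']
      dsimp only
      rw [if_neg (by rw [hch1]; exact fun h => h heq)]
      have harg : ((k : Int) + ↑T - (↑k + ↑T - ↑L1)) = ((L1 : Nat) : Int) := by ring
      rw [harg, Int.toNat_natCast, hk1cast]
    · simp only [altStep]
      rw [hslice, ← hcdef, eb0, show ((b0 : Int) + 1).toNat = b0 + 1 from by omega, hjcast, e1']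
      dsimp only
      rw [if_neg (by rw [hch1B]; exact fun h => h heq)]
      exact hk1cast
    · apply hkeep
      rw [husucc]
      have hb1L : b1 < (t.take L1).length := by omega
      rw [pvMb_snoc_eq (t.take L1) c b1
        (isB_restrict t L1 b1 p2 p1 (by omega)) hb1L
        (by rw [getD_take t L1 b1 p3 (by omega)]; exact heq.symm)
        ?_]
      · ring
      · intro m hmB hmlen hmc
        by_contra hgt
        have hmt : isB t m := isB_trans t L1 m p2 hmB
        rw [hlenu] at hmlen
        rw [getD_take t L1 m hmlen (by omega)] at hmc
        exact p6 m hmt (by omega) hmlen hmc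
  · -- mismatched exit: b1 = 0; both compare c with the candidate's first character
    have hb10 : b1 = 0 := by
      rcases p5 with h | h
      · exact h
      · exact absurd h.symm heq
    by_cases hlt : c < t.getD 0 ' '
    · -- new candidate k = j
      refine ⟨j, f.set 0 (-1), ?_, ?_, ?_⟩
      · simp only [boothStep]
        rw [← hcdef, hi0, show ((b0 : Int) - 1 + 2).toNat = b0 + 1 from by omega, hjcast, e2']
        dsimp only
        rw [if_pos (by rw [hch1]; exact heq), if_pos (by rw [hch0]; rw [hb10] at *; exact hlt)]
        have harg : ((k : Int) + ↑T - (↑k + ↑T)) = ((0 : Nat) : Int) := by push_cast; ring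
        rw [harg, Int.toNat_natCast]
      · simp only [altStep]
        rw [hslice, ← hcdef, eb0, show ((b0 : Int) + 1).toNat = b0 + 1 from by omega, hjcast, e1']
        dsimp only
        rw [if_pos (by rw [hch1B]; exact heq), if_pos (by rw [hch0B]; exact hlt)]
      · refine ⟨by omega, by rw [List.length_set]; exact hflen, ?_⟩
        intro m hm
        have hm0 : m = 0 := by omega
        rw [hm0, pvGetI_set_self f 0 (-1) (by rw [hflen]; omega)]
        have h1 : Useg l j 1 = Useg l j 0 ++ [l.getD j ' '] := Useg_succ l j 0 (by omega)
        have h0 : Useg l j 0 = [] := by simp [Useg]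
        rw [h1, h0, List.nil_append]
        rfl
    · -- candidate unchanged, table entry cleared
      refine ⟨k2n, f.set L1 (-1), ?_, ?_, ?_⟩
      · simp only [boothStep]
        rw [← hcdef, hi0, show ((b0 : Int) - 1 + 2).toNat = b0 + 1 from by omega, hjcast, e2']
        dsimp only
        rw [if_pos (by rw [hch1]; exact heq), if_neg (by rw [hch0]; rw [hb10] at *; exact hlt)]
        have harg : ((k : Int) + ↑T - (↑k + ↑T - ↑L1)) = ((L1 : Nat) : Int) := by ring
        rw [harg, Int.toNat_natCast, hk1cast]
      · simp only [altStep]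
        rw [hslice, ← hcdef, eb0, show ((b0 : Int) + 1).toNat = b0 + 1 from by omega, hjcast, e1']
        dsimp only
        rw [if_pos (by rw [hch1B]; exact heq), if_neg (by rw [hch0B]; exact hlt)]
        exact hk1cast
      · apply hkeep
        rw [husucc]
        rw [pvMb_snoc_zero (t.take L1) c ?_]
        · rfl
        · intro m hmB hmlen hmc
          have hmt : isB t m := isB_trans t L1 m p2 hmB
          rw [hlenu] at hmlen
          rw [getD_take t L1 m hmlen (by omega)] at hmc
          rcases Nat.eq_zero_or_pos m with hm0 | hmpos
          · rw [hm0] at hmc; exact heq (by rw [hb10]; exact hmc.symm)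
          · exact p6 m hmt (by omega) hmlen hmc

lemma loopSim (l : List Char) : ∀ (d j k : Nat) (f : List Int),
    j + d = l.length → OutInv l j k f →
    ((PySem.List.pyRange (j : Int) (l.length : Int) 1).foldl (fun kf jj => boothStep l jj kf) ((k : Int), f)).1 =
    (PySem.List.pyRange (j : Int) (l.length : Int) 1).foldl (fun kk jj => altStep l jj kk) (k : Int) := by
  intro d
  induction d with
  | zero =>
    intro j k f hd hinv
    rw [PySem.List.pyRange_one_eq_nil (by omega)]
    rfl
  | succ d ih =>
    intro j k f hd hinv
    have hj : j < l.length := by omega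
    rw [PySem.List.pyRange_one_cons (by exact_mod_cast hj)]
    obtain ⟨k2, f2, hA, hB, hinv2⟩ := stepSim l j k f hj hinv
    simp only [List.foldl_cons]
    rw [hA, hB]
    have hcast : (j : Int) + 1 = ((j + 1 : Nat) : Int) := by push_cast; ring
    rw [hcast]
    exact ih (j+1) k2 f2 (by omega) hinv2

-- ===== VERDICT (by name: the statement is the Claim_ definition above) =====
theorem min_rotation_start_spec : Claim_equal_min_rotation_start := by
  unfold Claim_equal_min_rotation_start Spec_min_rotation_start
  intro s _
  show min_rotation_start s = min_rotation_start_alt s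
  unfold min_rotation_start min_rotation_start_alt
  rcases eq_or_ne (s.toList ++ s.toList) [] with h | h
  · rw [h]; rfl
  · have hlen : 0 < (s.toList ++ s.toList).length := List.length_pos_iff.mpr h
    have hent : ∀ m : Nat, m < 1 - 0 →
        pvGetI (List.replicate (s.toList ++ s.toList).length (-1)) (m : Int) =
          pvMb (Useg (s.toList ++ s.toList) 0 (m+1)) - 1 := by
      intro m hm
      have hm0 : m = 0 := by omega
      subst hm0
      have h1 : pvGetI (List.replicate (s.toList ++ s.toList).length (-1)) ((0 : Nat) : Int) = -1 := by
        have hs : 0 < s.length := by have h' := hlen; simp at h'; omega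
        rw [pvGetI, PySem.List.pyGet?_natCast, List.getElem?_replicate]
        simp [hs]
      have h2 : pvMb (Useg (s.toList ++ s.toList) 0 1) = 0 := by
        have hl1 : (Useg (s.toList ++ s.toList) 0 1).length = 1 :=
          length_Useg (s.toList ++ s.toList) 0 1 (by omega)
        rw [pvMb, hl1]
        rfl
      rw [h1, h2]
      omega
    have hmain := loopSim (s.toList ++ s.toList) ((s.toList ++ s.toList).length - 1) 1 0
      (List.replicate (s.toList ++ s.toList).length (-1)) (by omega)
      ⟨by omega, by simp, hent⟩
    exact_mod_cast hmain
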